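-- pv_equiv track=rewrite | github.com/riashaji44/riasrepository | python-projects/dictionary_practice_solution.py | most_popular_foods
-- ===== SOURCE A (Python) =====
-- def most_popular_foods(fav_foods):
--
--     '''
--     Given a dictionary of people's favorite foods, return a new dictionary
--     with food as the key and the list of people who like that food as the value.
--     Example, given
--     fav_foods={'Kathleen': 'pizza', 'Steve': 'burger', 'John': 'steak',
--     'Michelle': 'pasta', 'Patrick': 'pizza'})
--     You should return the new dictionary
--     {'pizza': ['Kathleen', 'Patrick'], 'burger': ['Steve'], 'steak': ['John'],
--     'pasta': ['Michelle']}
--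
--     Steps
--     Create an empty dictionary
--     Iterate through the fav_foods dictionary
--         if the food (value) is NOT in the new dictionary:
--             create an empty list and add the person to the list
--             add the food as they key and the list as the value
--         else:
--             add the person to the list of people who favorite that food
--     return dictionary
--     '''
--     foods={}
--     for person, food in fav_foods.items():
--         if food not in foods:
--             people=[person]
--             foods[food]=people
--         else:
--             foods[food].append(person)
--     return foods
-- ===== SOURCE B (Python) =====
-- def most_popular_foods(fav_foods):
--     return {food: [person for person, f in fav_foods.items() if f == food]
--             for food in fav_foods.values()}
-- ===== Notes on version B (the rewrite author's own statement) =====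
-- stated objective: simpler
-- what changed: Replaces A's stateful loop (create-or-append into an accumulator dict) by a single dict comprehension over the food values whose entry for each food is collected by one scan over the items.
import Mathlib
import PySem

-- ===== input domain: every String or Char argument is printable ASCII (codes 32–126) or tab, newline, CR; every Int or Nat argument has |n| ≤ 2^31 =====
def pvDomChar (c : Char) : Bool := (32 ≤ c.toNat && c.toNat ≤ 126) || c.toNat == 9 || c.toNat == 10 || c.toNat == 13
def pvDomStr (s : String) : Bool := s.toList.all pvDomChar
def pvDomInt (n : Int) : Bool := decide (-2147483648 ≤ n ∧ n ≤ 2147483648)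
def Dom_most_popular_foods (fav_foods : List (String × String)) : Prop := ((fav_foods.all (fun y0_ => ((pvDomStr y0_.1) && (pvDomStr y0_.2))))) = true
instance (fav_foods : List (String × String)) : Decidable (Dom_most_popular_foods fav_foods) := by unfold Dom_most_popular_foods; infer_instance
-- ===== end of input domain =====

-- B replaces A's incremental insert/append loop by a single dict comprehension that, for each
-- food value, scans the items once to collect the people liking it (simpler, not faster).

-- ===== PORT A =====
-- A: foods = {}; for person, food: if food not in foods: foods[food] = [person] else: foods[food].append(person)
def most_popular_foods (fav_foods : List (String × String)) : List (String × List String) :=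
  (fav_foods.foldl
    (fun foods pf =>
      if foods.contains pf.2 = false then
        foods.insert pf.2 [pf.1]
      else
        foods.modify pf.2 [] (fun people => people ++ [pf.1]))
    PySem.Dict.empty).items

-- ===== PORT B =====
-- B: {food: [person for person, f in fav_foods.items() if f == food] for food in fav_foods.values()}
def most_popular_foods_alt (fav_foods : List (String × String)) : List (String × List String) :=
  ((fav_foods.map Prod.snd).foldl
    (fun d food =>
      d.insert food ((fav_foods.filter (fun pf => pf.2 == food)).map Prod.fst))
    PySem.Dict.empty).items

-- ===== PRECONDITION & SPEC =====
def Spec_most_popular_foods (fav_foods : List (String × String)) (out : List (String × List String)) : Prop := out = most_popular_foods_alt fav_foods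
instance (fav_foods : List (String × String)) (out : List (String × List String)) : Decidable (Spec_most_popular_foods fav_foods out) := by unfold Spec_most_popular_foods; infer_instance

-- ===== CLAIM (what is proved, stated in full; the proofs are below) =====
def Claim_equal_most_popular_foods : Prop := ∀ (fav_foods : List (String × String)), Dom_most_popular_foods fav_foods → Spec_most_popular_foods fav_foods (most_popular_foods fav_foods)

-- ===== LEMMAS AND PROOFS =====

-- A's branching loop body is exactly Dict.modify at the value's key.
theorem stepA_eq_modify (foods : PySem.Dict String (List String)) (pf : String × String) :
    (if foods.contains pf.2 = false then foods.insert pf.2 [pf.1]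
     else foods.modify pf.2 [] (fun people => people ++ [pf.1]))
    = foods.modify pf.2 [] (fun people => people ++ [pf.1]) := by
  by_cases h : foods.contains pf.2 = false
  · simp [h, PySem.Dict.modify, PySem.Dict.getD_of_not_contains]
  · simp [h]

-- A folded loop of inserts whose value depends only on the key: last (= any) insert wins.
theorem getD_foldl_insert_const (f : String → List String) (l : List String)
    (d : PySem.Dict String (List String)) (c : String) :
    (l.foldl (fun d x => d.insert x (f x)) d).getD c []
      = if c ∈ l then f c else d.getD c [] := by
  induction l generalizing d with
  | nil => simp
  | cons x xs ih =>
    simp only [List.foldl_cons, ih, List.mem_cons, PySem.Dict.getD_insert]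
    by_cases hc : c ∈ xs
    · simp [hc]
    · by_cases hx : c = x <;> simp [hc, hx]

theorem dictA_eq_modify_fold (fav_foods : List (String × String)) :
    fav_foods.foldl
      (fun foods pf =>
        if foods.contains pf.2 = false then foods.insert pf.2 [pf.1]
        else foods.modify pf.2 [] (fun people => people ++ [pf.1]))
      PySem.Dict.empty
    = fav_foods.foldl (fun foods pf => foods.modify pf.2 [] (fun people => people ++ [pf.1]))
        PySem.Dict.empty := by
  have h : (fun (foods : PySem.Dict String (List String)) (pf : String × String) =>
      if foods.contains pf.2 = false then foods.insert pf.2 [pf.1]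
      else foods.modify pf.2 [] (fun people => people ++ [pf.1]))
    = fun foods pf => foods.modify pf.2 [] (fun people => people ++ [pf.1]) := by
    funext foods pf
    exact stepA_eq_modify foods pf
  rw [h]

theorem most_popular_foods_eq_alt (fav_foods : List (String × String)) :
    most_popular_foods fav_foods = most_popular_foods_alt fav_foods := by
  unfold most_popular_foods most_popular_foods_alt
  rw [dictA_eq_modify_fold]
  set dA := fav_foods.foldl
      (fun foods pf => foods.modify pf.2 [] (fun people => people ++ [pf.1]))
      PySem.Dict.empty with hdA
  set dB := (fav_foods.map Prod.snd).foldl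
      (fun d food =>
        d.insert food ((fav_foods.filter (fun pf => pf.2 == food)).map Prod.fst))
      PySem.Dict.empty with hdB
  have hkeysA : dA.keys = PySem.Set.update (PySem.Dict.empty : PySem.Dict String (List String)).keys (fav_foods.map Prod.snd) := by
    rw [hdA]
    exact PySem.Dict.keys_foldl_modify_key fav_foods Prod.snd []
      (fun _ pf => fun people => people ++ [pf.1]) PySem.Dict.empty
  have hkeysB : dB.keys = PySem.Set.update (PySem.Dict.empty : PySem.Dict String (List String)).keys (fav_foods.map Prod.snd) := by
    rw [hdB]
    exact PySem.Dict.keys_foldl_insert (fav_foods.map Prod.snd)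
      (fun _ food => (fav_foods.filter (fun pf => pf.2 == food)).map Prod.fst) PySem.Dict.empty
  have hkeys : dA.keys = dB.keys := hkeysA.trans hkeysB.symm
  have hndA : dA.keys.Nodup := by
    rw [hdA]
    exact PySem.Dict.nodup_keys_foldl_modify_key fav_foods Prod.snd []
      (fun _ pf => fun people => people ++ [pf.1]) PySem.Dict.empty PySem.Dict.nodup_keys_empty
  have hndB : dB.keys.Nodup := hkeys ▸ hndA
  rw [PySem.Dict.items_eq_map_keys dA hndA [], PySem.Dict.items_eq_map_keys dB hndB [], hkeys]
  apply List.map_congr_left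
  intro k hk
  have hkmem : k ∈ fav_foods.map Prod.snd := by
    rw [hkeysB] at hk
    have : k ∈ PySem.Set.ofList (fav_foods.map Prod.snd) := hk
    exact (PySem.Set.mem_ofList _ _).mp this
  have hA : dA.getD k [] = (fav_foods.filter (fun pf => pf.2 == k)).map Prod.fst := by
    rw [hdA]
    have hswap : fav_foods.foldl
        (fun foods pf => foods.modify pf.2 [] (fun people => people ++ [pf.1]))
        PySem.Dict.empty
      = ((fav_foods.map (fun pf => (pf.2, pf.1))).foldl
          (fun foods p => foods.modify p.1 [] (fun people => people ++ [p.2]))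
          PySem.Dict.empty) := by rw [List.foldl_map]
    rw [hswap, PySem.Dict.getD_foldl_modify_append]
    simp [List.filter_map, Function.comp_def]
  have hB : dB.getD k [] = (fav_foods.filter (fun pf => pf.2 == k)).map Prod.fst := by
    rw [hdB, getD_foldl_insert_const (fun food => (fav_foods.filter (fun pf => pf.2 == food)).map Prod.fst)]
    simp [hkmem]
  rw [hA, hB]

-- ===== VERDICT (by name: the statement is the Claim_ definition above) =====
theorem most_popular_foods_spec : Claim_equal_most_popular_foods := by
  intro fav_foods _
  unfold Spec_most_popular_foods
  exact most_popular_foods_eq_alt fav_foods
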